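-- pv_equiv track=rewrite | github.com/kat-vaganova/Python_algorithms | Homework_03/task_05.py | is_max
-- ===== SOURCE A (Python) =====
-- def is_max(num):
--     temp_dict = {ind: num[ind] for ind in range(len(num)) if num[ind] < 0}
--     max_el = -10
--     for value in temp_dict.values():
--         if value > max_el:
--             max_el = value
--     return {f'Позиция в массиве {key}': f'искомое число {value}' for key, value in temp_dict.items() if
--             value == max_el}
-- ===== SOURCE B (Python) =====
-- def is_max(num):
--     # one pass: track the best (largest) negative seen (seeded at -10) and all its positions
--     best = -10
--     hits = []
--     for i in range(len(num)):
--         v = num[i]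
--         if v < 0:
--             if v > best:
--                 best = v
--                 hits = [(i, v)]
--             elif v == best:
--                 hits.append((i, v))
--     return {f'Позиция в массиве {i}': f'искомое число {v}' for i, v in hits}
-- ===== Notes on version B (the rewrite author's own statement) =====
-- stated objective: faster
-- what changed: Replaces A's three passes (build a dict of all negatives, scan its values for the max, filter the dict again) with a single scan that maintains the running best negative and the list of its positions, resetting on a new best and appending on a tie.
import Mathlib
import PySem

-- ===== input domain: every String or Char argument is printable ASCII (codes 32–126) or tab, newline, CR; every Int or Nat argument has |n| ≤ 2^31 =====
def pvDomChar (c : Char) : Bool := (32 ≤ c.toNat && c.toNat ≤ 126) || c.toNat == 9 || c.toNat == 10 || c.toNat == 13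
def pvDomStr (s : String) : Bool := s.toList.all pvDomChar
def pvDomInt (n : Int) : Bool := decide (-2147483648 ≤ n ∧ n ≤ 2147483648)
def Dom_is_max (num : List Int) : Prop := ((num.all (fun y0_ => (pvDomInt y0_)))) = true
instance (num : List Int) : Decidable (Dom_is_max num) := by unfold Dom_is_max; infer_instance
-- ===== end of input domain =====

-- B replaces A's three passes (build a dict of negatives, scan its values for the max, filter again)
-- by a single scan keeping the running best negative and the list of its positions (objective: alternative).

-- ===== PORT A =====
-- A, line by line: dict comprehension over range(len(num)) keeping negatives,
-- a loop computing max_el (seeded -10) over its values, and a final dict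
-- comprehension keeping the entries equal to max_el, with the Russian f-strings.
def is_max (num : List Int) : List (String × String) :=
  let temp_dict : PySem.Dict Int Int :=
    (PySem.List.pyRange 0 (num.length : Int) 1).foldl
      (fun d ind =>
        if PySem.List.pyGetD num ind 0 < 0 then
          PySem.Dict.insert d ind (PySem.List.pyGetD num ind 0)
        else d)
      PySem.Dict.empty
  let max_el : Int :=
    (PySem.Dict.values temp_dict).foldl (fun m v => if v > m then v else m) (-10)
  let out : PySem.Dict String String :=
    (PySem.Dict.items temp_dict).foldl
      (fun d kv =>
        if kv.2 == max_el then
          PySem.Dict.insert d ("Позиция в массиве " ++ PySem.Int.toStr kv.1)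
            ("искомое число " ++ PySem.Int.toStr kv.2)
        else d)
      PySem.Dict.empty
  PySem.Dict.items out

-- ===== PORT B =====
-- B, line by line: one fold over range(len(num)) with state (best, hits);
-- a new best resets hits, a tie appends; then the same final dict comprehension.
def is_max_alt (num : List Int) : List (String × String) :=
  let st : Int × List (Int × Int) :=
    (PySem.List.pyRange 0 (num.length : Int) 1).foldl
      (fun (st : Int × List (Int × Int)) i =>
        let v := PySem.List.pyGetD num i 0
        if v < 0 then
          if v > st.1 then (v, [(i, v)])
          else if v == st.1 then (st.1, st.2 ++ [(i, v)])
          else st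
        else st)
      (-10, [])
  let out : PySem.Dict String String :=
    st.2.foldl
      (fun d kv =>
        PySem.Dict.insert d ("Позиция в массиве " ++ PySem.Int.toStr kv.1)
          ("искомое число " ++ PySem.Int.toStr kv.2))
      PySem.Dict.empty
  PySem.Dict.items out

-- ===== PRECONDITION & SPEC =====
def Spec_is_max (num : List Int) (out : List (String × String)) : Prop := out = is_max_alt num
instance (num : List Int) (out : List (String × String)) : Decidable (Spec_is_max num out) := by unfold Spec_is_max; infer_instance

-- ===== CLAIM (what is proved, stated in full; the proofs are below) =====
def Claim_equal_is_max : Prop := ∀ (num : List Int), Dom_is_max num → Spec_is_max num (is_max num)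

-- ===== LEMMAS AND PROOFS =====

-- the list of (index, value) pairs both loops traverse
def pvPairs (num : List Int) : List (Int × Int) :=
  (PySem.List.pyRange 0 (num.length : Int) 1).map (fun i => (i, PySem.List.pyGetD num i 0))

-- the negative entries, and the running maximum (seed -10) of their values
def pvNegs (l : List (Int × Int)) : List (Int × Int) := l.filter (fun iv => decide (iv.2 < 0))
def pvMx (l : List (Int × Int)) : Int := (pvNegs l).foldl (fun m iv => if iv.2 > m then iv.2 else m) (-10)

theorem pv_seed_le (t : List (Int × Int)) (m : Int) :
    m ≤ t.foldl (fun m iv => if iv.2 > m then iv.2 else m) m := by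
  induction t generalizing m with
  | nil => simp
  | cons q t ih =>
    simp only [List.foldl_cons]
    calc m ≤ (if q.2 > m then q.2 else m) := by split <;> omega
      _ ≤ _ := ih _

theorem pv_le_foldl_mx (t : List (Int × Int)) (p : Int × Int) :
    p ∈ t → ∀ m : Int, p.2 ≤ t.foldl (fun m iv => if iv.2 > m then iv.2 else m) m := by
  induction t with
  | nil => intro hp; cases hp
  | cons q t ih =>
    intro hp m
    simp only [List.foldl_cons]
    rcases List.mem_cons.mp hp with h | h
    · subst h
      calc p.2 ≤ (if p.2 > m then p.2 else m) := by split <;> omega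
        _ ≤ _ := pv_seed_le t _
    · exact ih h _

theorem pvMx_bound (l : List (Int × Int)) (p : Int × Int) (hp : p ∈ pvNegs l) : p.2 ≤ pvMx l :=
  pv_le_foldl_mx _ _ hp _

-- B's loop invariant: the fold yields the running max and exactly its positions
theorem pvB_fold (l : List (Int × Int)) :
    l.foldl
      (fun (st : Int × List (Int × Int)) iv =>
        if iv.2 < 0 then
          if iv.2 > st.1 then (iv.2, [iv])
          else if iv.2 == st.1 then (st.1, st.2 ++ [iv])
          else st
        else st)
      (-10, [])
    = (pvMx l, (pvNegs l).filter (fun iv => iv.2 == pvMx l)) := by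
  induction l using List.reverseRecOn with
  | nil => simp [pvMx, pvNegs]
  | append_singleton l e ih =>
    rw [List.foldl_append, ih]
    by_cases hneg : e.2 < 0
    · have hnegs : pvNegs (l ++ [e]) = pvNegs l ++ [e] := by
        simp [pvNegs, List.filter_append, hneg]
      have hmx : pvMx (l ++ [e]) = if e.2 > pvMx l then e.2 else pvMx l := by
        simp [pvMx, hnegs, List.foldl_append]
      by_cases hgt : e.2 > pvMx l
      · have hmx' : pvMx (l ++ [e]) = e.2 := by rw [hmx]; simp [hgt]
        simp only [List.foldl_cons, List.foldl_nil, hneg, if_pos, hgt]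
        rw [hnegs, hmx']
        simp only [List.filter_append]
        have hnil : (pvNegs l).filter (fun iv => iv.2 == e.2) = [] := by
          rw [List.filter_eq_nil_iff]
          intro p hp
          have := pvMx_bound l p hp
          simp only [beq_iff_eq]
          omega
        simp [hnil]
      · have hmx' : pvMx (l ++ [e]) = pvMx l := by rw [hmx]; simp [hgt]
        rw [hnegs, hmx']
        by_cases heq : e.2 = pvMx l
        · rw [heq] at hneg
          simp [hneg, heq, List.filter_append]
        · simp [hneg, hgt, heq, List.filter_append]
    · have hnegs : pvNegs (l ++ [e]) = pvNegs l := by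
        simp [pvNegs, List.filter_append, hneg]
      have hmx : pvMx (l ++ [e]) = pvMx l := by simp [pvMx, hnegs]
      simp [hneg, hnegs, hmx]

-- the indices in pvPairs are pairwise distinct
theorem pvPairs_pairwise (num : List Int) : (pvPairs num).Pairwise (fun p q => p.1 ≠ q.1) := by
  unfold pvPairs
  refine List.Pairwise.map _ ?_ (PySem.List.pairwise_lt_pyRange_one 0 (num.length : Int))
  intro a b hab
  simp only [ne_eq]
  omega

-- A's dict-building loop, generalized over the initial dict
theorem pvA_dict (l : List (Int × Int)) (d : PySem.Dict Int Int)
    (hfresh : ∀ p ∈ l, PySem.Dict.contains d p.1 = false)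
    (hpw : l.Pairwise (fun p q => p.1 ≠ q.1)) :
    (l.foldl
      (fun d (iv : Int × Int) => if iv.2 < 0 then PySem.Dict.insert d iv.1 iv.2 else d) d).items
    = d.items ++ pvNegs l := by
  induction l generalizing d with
  | nil => simp [pvNegs]
  | cons p l ih =>
    have hpd : PySem.Dict.contains d p.1 = false := hfresh p (by simp)
    have hpw' := (List.pairwise_cons.mp hpw)
    simp only [List.foldl_cons]
    by_cases hneg : p.2 < 0
    · rw [if_pos hneg, ih (PySem.Dict.insert d p.1 p.2) ?_ hpw'.2]
      · rw [PySem.Dict.items_insert_of_not_contains _ _ hpd]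
        simp [pvNegs, hneg]
      · intro q hq
        rw [PySem.Dict.contains_insert]
        simp only [Bool.or_eq_false_iff]
        refine ⟨?_, hfresh q (by simp [hq])⟩
        simpa using (hpw'.1 q hq).symm
    · rw [if_neg hneg, ih d (fun q hq => hfresh q (by simp [hq])) hpw'.2]
      simp [pvNegs, hneg]

-- A's and B's index loops are loops over the common pair list pvPairs num
theorem pvA_map (num : List Int) :
    (PySem.List.pyRange 0 (num.length : Int) 1).foldl
        (fun d ind =>
          if PySem.List.pyGetD num ind 0 < 0 then
            PySem.Dict.insert d ind (PySem.List.pyGetD num ind 0)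
          else d) PySem.Dict.empty
      = (pvPairs num).foldl
        (fun d (iv : Int × Int) => if iv.2 < 0 then PySem.Dict.insert d iv.1 iv.2 else d)
        PySem.Dict.empty := by
  unfold pvPairs
  rw [List.foldl_map]

theorem pvB_map (num : List Int) :
    (PySem.List.pyRange 0 (num.length : Int) 1).foldl
        (fun (st : Int × List (Int × Int)) i =>
          let v := PySem.List.pyGetD num i 0
          if v < 0 then
            if v > st.1 then (v, [(i, v)])
            else if v == st.1 then (st.1, st.2 ++ [(i, v)])
            else st
          else st) (-10, [])
      = (pvPairs num).foldl
        (fun (st : Int × List (Int × Int)) iv =>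
          if iv.2 < 0 then
            if iv.2 > st.1 then (iv.2, [iv])
            else if iv.2 == st.1 then (st.1, st.2 ++ [iv])
            else st
          else st) (-10, []) := by
  unfold pvPairs
  rw [List.foldl_map]

-- ===== VERDICT (by name: the statement is the Claim_ definition above) =====
theorem is_max_spec : Claim_equal_is_max := by
  intro num _
  unfold Spec_is_max
  simp only [is_max, is_max_alt]
  rw [pvA_map, pvB_map, pvB_fold]
  have hitems := pvA_dict (pvPairs num) PySem.Dict.empty (by intro p _; rfl) (pvPairs_pairwise num)
  rw [show (PySem.Dict.empty : PySem.Dict Int Int).items = [] from rfl, List.nil_append] at hitems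
  rw [show ∀ d : PySem.Dict Int Int, PySem.Dict.values d = d.items.map (·.2) from fun _ => rfl]
  rw [hitems, List.foldl_map, ← List.foldl_filter]
  rfl
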